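-- pv_equiv track=rewrite | github.com/hyejinny97/Coding-Test | Programmers/Lv.2/방문길이.py | solution
-- ===== SOURCE A (Python) =====
-- def solution(dirs):
--     # 10 x 10 크기의 좌표평면
--     matrix = []
--     for _ in range(11):
--         row = []
--         for _ in range(11):
--             row.append([])
--         matrix.append(row)
--
--     # 명령어에 따라 이동할 때, 현재 위치에서 어느 '방향'으로 이동했는지 기록
--     x, y = [5, 5]  # 캐릭터 현재 위치
--     direction = {'R': (1, 0), 'L': (-1, 0), 'D': (0, -1), 'U': (0, 1)}
--     distance = 0  # 처음 걸어본 길의 길이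
--     for d in dirs:
--         # 좌표평면 경계를 벗어나는 경우, 명령어 무시
--         nx = x + direction[d][0]
--         ny = y + direction[d][1]
--         if nx < 0 or ny < 0 or nx > 10 or ny > 10:
--             continue
--
--         # 이동 '방향' 기록
--         if direction[d] not in matrix[x][y]:
--             matrix[x][y].append(direction[d])
--             distance += 1
--
--         # 캐릭터 이동
--         x, y = nx, ny
--
--     return distance
-- ===== SOURCE B (Python) =====
-- def solution(dirs):
--     moves = {'R': (1, 0), 'L': (-1, 0), 'D': (0, -1), 'U': (0, 1)}
--     # pass 1: record the whole trajectory of positions (a blocked move stays put)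
--     path = [(5, 5)]
--     for d in dirs:
--         x, y = path[-1]
--         nx, ny = x + moves[d][0], y + moves[d][1]
--         if 0 <= nx <= 10 and 0 <= ny <= 10:
--             path.append((nx, ny))
--         else:
--             path.append((x, y))
--     # pass 2: encode every actual step (start cell, end cell) as one integer key
--     keys = []
--     for (x, y), (nx, ny) in zip(path, path[1:]):
--         if (x, y) != (nx, ny):
--             keys.append((x * 11 + y) * 121 + nx * 11 + ny)
--     # pass 3: sort and count distinct keys by adjacent comparison
--     keys.sort()
--     count = 0
--     prev = None
--     for k in keys:
--         if k != prev:
--             count += 1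
--         prev = k
--     return count
-- ===== Notes on version B (the rewrite author's own statement) =====
-- stated objective: alternative
-- what changed: B replaces A's mutable 11x11 grid of per-cell direction lists with incremental membership tests by three staged passes: record the full position trajectory (blocked moves stay put), encode each actual step (start cell, end cell) as one integer key, then sort the keys and count distinct by adjacent comparison.
import Mathlib
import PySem

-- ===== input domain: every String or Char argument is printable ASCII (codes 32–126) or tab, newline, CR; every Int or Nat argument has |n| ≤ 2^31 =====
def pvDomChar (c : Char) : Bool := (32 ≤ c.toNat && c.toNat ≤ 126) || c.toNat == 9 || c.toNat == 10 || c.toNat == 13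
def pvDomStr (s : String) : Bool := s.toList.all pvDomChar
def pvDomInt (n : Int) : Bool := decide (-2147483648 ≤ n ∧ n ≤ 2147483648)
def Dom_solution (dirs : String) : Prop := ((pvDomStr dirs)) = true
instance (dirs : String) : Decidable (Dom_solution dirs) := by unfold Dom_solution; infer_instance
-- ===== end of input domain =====

-- B replaces A's mutable 11x11 grid of per-cell direction lists (with incremental membership
-- tests) by three staged passes: record the whole position trajectory, encode each actual step
-- as one integer key, then sort the keys and count distinct by adjacent comparison; objective: alternative.

-- ===== PORT A =====
-- direction[d]: constant dict lookup; the final (0,0) arm is the KeyError case, excluded by Pre_solution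
def dirGetA (c : Char) : Int × Int :=
  if c = 'R' then (1, 0) else if c = 'L' then (-1, 0)
  else if c = 'D' then (0, -1) else if c = 'U' then (0, 1) else (0, 0)

-- one iteration of A's loop on the state (matrix, x, y, distance); matrix[x][y].append is
-- ported as List.set at x.toNat/y.toNat (the loop keeps 0 ≤ x,y ≤ 10, so toNat is exact)
def stepA (st : List (List (List (Int × Int))) × Int × Int × Int) (c : Char) :
    List (List (List (Int × Int))) × Int × Int × Int :=
  match st with
  | (m, x, y, dist) =>
    let dd := dirGetA c
    let nx := x + dd.1
    let ny := y + dd.2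
    if nx < 0 ∨ ny < 0 ∨ nx > 10 ∨ ny > 10 then (m, x, y, dist)
    else
      let row := m.getD x.toNat []
      let cell := row.getD y.toNat []
      if dd ∈ cell then (m, nx, ny, dist)
      else (m.set x.toNat (row.set y.toNat (cell ++ [dd])), nx, ny, dist + 1)

def solution (dirs : String) : Int :=
  let matrix : List (List (List (Int × Int))) := List.replicate 11 (List.replicate 11 [])
  (dirs.toList.foldl stepA (matrix, 5, 5, 0)).2.2.2

-- ===== PORT B =====
def dirGetB (c : Char) : Int × Int :=
  if c = 'R' then (1, 0) else if c = 'L' then (-1, 0)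
  else if c = 'D' then (0, -1) else if c = 'U' then (0, 1) else (0, 0)

-- pass 1, one iteration: path[-1] is ported as getLastD (path is never empty, so the default is unreachable)
def stepPath (path : List (Int × Int)) (c : Char) : List (Int × Int) :=
  let p := path.getLastD (0, 0)
  let dd := dirGetB c
  let nx := p.1 + dd.1
  let ny := p.2 + dd.2
  if 0 ≤ nx ∧ nx ≤ 10 ∧ 0 ≤ ny ∧ ny ≤ 10 then path ++ [(nx, ny)] else path ++ [p]

-- (x * 11 + y) * 121 + nx * 11 + ny
def encKey (a b : Int × Int) : Int := (a.1 * 11 + a.2) * 121 + b.1 * 11 + b.2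

def solution_alt (dirs : String) : Int :=
  let path := dirs.toList.foldl stepPath [(5, 5)]
  let keys := (path.zip path.tail).foldl
    (fun ks pq => if pq.1 ≠ pq.2 then ks ++ [encKey pq.1 pq.2] else ks) []
  let skeys := PySem.List.sorted keys (fun k => k) false
  (skeys.foldl (fun st k => if some k ≠ st.2 then (st.1 + 1, some k) else (st.1, some k))
    ((0 : Int), (none : Option Int))).1

-- ===== PRECONDITION & SPEC =====
-- Pre_ excludes exactly the inputs on which A raises KeyError: a move character that is not a key of A's direction dict
def Pre_solution (dirs : String) : Prop :=
  dirs.toList.all (fun c => c = 'R' ∨ c = 'L' ∨ c = 'D' ∨ c = 'U') = true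
instance (dirs : String) : Decidable (Pre_solution dirs) := by unfold Pre_solution; infer_instance
def pvWitness_solution : String := "ULURRDLLU"

def Spec_solution (dirs : String) (out : Int) : Prop := out = solution_alt dirs
instance (dirs : String) (out : Int) : Decidable (Spec_solution dirs out) := by unfold Spec_solution; infer_instance

-- ===== CLAIM (what is proved, stated in full; the proofs are below) =====
def Claim_equal_solution : Prop := ∀ (dirs : String), Dom_solution dirs → Pre_solution dirs → Spec_solution dirs (solution dirs)

-- ===== LEMMAS AND PROOFS =====

-- proof-side walk producing the list of (x, y, nx, ny) step tuples (same bound test as A)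
def stepE (st : List (Int × Int × Int × Int) × Int × Int) (c : Char) :
    List (Int × Int × Int × Int) × Int × Int :=
  match st with
  | (edges, x, y) =>
    let dd := dirGetA c
    let nx := x + dd.1
    let ny := y + dd.2
    if nx < 0 ∨ ny < 0 ∨ nx > 10 ∨ ny > 10 then (edges, x, y)
    else (edges ++ [(x, y, nx, ny)], nx, ny)

def encE (e : Int × Int × Int × Int) : Int := encKey (e.1, e.2.1) (e.2.2.1, e.2.2.2)

def keysOf (path : List (Int × Int)) : List Int :=
  (path.zip path.tail).flatMap (fun pq => if pq.1 ≠ pq.2 then [encKey pq.1 pq.2] else [])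

-- the invariant linking A's grid state to the edge-list walk
def InvAB (m : List (List (List (Int × Int)))) (x y dist : Int)
    (edges : List (Int × Int × Int × Int)) : Prop :=
  0 ≤ x ∧ x ≤ 10 ∧ 0 ≤ y ∧ y ≤ 10 ∧
  m.length = 11 ∧ (∀ r ∈ m, r.length = 11) ∧
  dist = ((PySem.Set.ofList edges).length : Int) ∧
  (∀ (i j : Nat), i < 11 → j < 11 → ∀ (d : Int × Int),
    d ∈ ((m.getD i []).getD j []) ↔ ((i : Int), (j : Int), (i : Int) + d.1, (j : Int) + d.2) ∈ edges)

lemma ofList_append_singleton {α : Type} [BEq α] (l : List α) (e : α) :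
    PySem.Set.ofList (l ++ [e]) = PySem.Set.add (PySem.Set.ofList l) e := by
  simp [PySem.Set.ofList_eq_foldl]

lemma len_ofList_append_singleton {α : Type} [BEq α] [LawfulBEq α] (l : List α) (e : α) :
    (PySem.Set.ofList (l ++ [e])).length
      = (PySem.Set.ofList l).length + (if e ∈ l then 0 else 1) := by
  rw [ofList_append_singleton]
  unfold PySem.Set.add
  by_cases h : e ∈ l
  · simp [h, PySem.Set.contains, (PySem.Set.mem_ofList l e).2 h]
  · have : e ∉ PySem.Set.ofList l := fun hc => h ((PySem.Set.mem_ofList l e).1 hc)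
    simp [PySem.Set.contains, this, h]

lemma inv_step (m : List (List (List (Int × Int)))) (x y dist : Int)
    (edges : List (Int × Int × Int × Int)) (c : Char) (h : InvAB m x y dist edges) :
    InvAB (stepA (m, x, y, dist) c).1 (stepE (edges, x, y) c).2.1
        (stepE (edges, x, y) c).2.2 (stepA (m, x, y, dist) c).2.2.2
        (stepE (edges, x, y) c).1 ∧
    (stepA (m, x, y, dist) c).2.1 = (stepE (edges, x, y) c).2.1 ∧
    (stepA (m, x, y, dist) c).2.2.1 = (stepE (edges, x, y) c).2.2 := by
  obtain ⟨hx0, hx1, hy0, hy1, hmlen, hrows, hdist, hmem⟩ := h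
  simp only [stepA, stepE]
  set dd := dirGetA c with hdd
  by_cases hb : x + dd.1 < 0 ∨ y + dd.2 < 0 ∨ x + dd.1 > 10 ∨ y + dd.2 > 10
  · simp only [if_pos hb]
    exact ⟨⟨hx0, hx1, hy0, hy1, hmlen, hrows, hdist, hmem⟩, by trivial, by trivial⟩
  · simp only [if_neg hb]
    rw [not_or, not_or, not_or] at hb
    obtain ⟨hb1, hb2, hb3, hb4⟩ := hb
    have hxt : (x.toNat : Int) = x := Int.toNat_of_nonneg hx0
    have hyt : (y.toNat : Int) = y := Int.toNat_of_nonneg hy0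
    have hxlt : x.toNat < 11 := by omega
    have hylt : y.toNat < 11 := by omega
    set row := m.getD x.toNat [] with hrowdef
    set cell := row.getD y.toNat [] with hcelldef
    have hrowlen : row.length = 11 := by
      rw [hrowdef, List.getD_eq_getElem?_getD, List.getElem?_eq_getElem (by omega)]
      exact hrows _ (List.getElem_mem _)
    have hcellmem : dd ∈ cell ↔ (x, y, x + dd.1, y + dd.2) ∈ edges := by
      have := hmem x.toNat y.toNat hxlt hylt dd
      rwa [hxt, hyt] at this
    by_cases hin : dd ∈ cell
    · -- already recorded: A leaves the grid unchanged, the walk appends a duplicate edge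
      simp only [if_pos hin]
      refine ⟨⟨by omega, by omega, by omega, by omega, hmlen, hrows, ?_, ?_⟩, by trivial, by trivial⟩
      · rw [len_ofList_append_singleton, if_pos (hcellmem.1 hin)]; simp [hdist]
      · intro i j hi hj d
        rw [hmem i j hi hj d]
        constructor
        · exact fun h' => List.mem_append_left _ h'
        · intro h'
          rcases List.mem_append.1 h' with h' | h'
          · exact h'
          · simp only [List.mem_singleton, Prod.mk.injEq] at h'
            obtain ⟨hix, hjy, hd1, hd2⟩ := h'
            have hd1' : d.1 = dd.1 := by omega
            have hd2' : d.2 = dd.2 := by omega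
            rw [hix, hjy, hd1', hd2']
            exact hcellmem.1 hin
    · -- new edge: A appends to the cell and bumps distance, the walk appends the edge
      simp only [if_neg hin]
      have hnotedge : (x, y, x + dd.1, y + dd.2) ∉ edges := fun h' => hin (hcellmem.2 h')
      refine ⟨⟨by omega, by omega, by omega, by omega, ?_, ?_, ?_, ?_⟩, by trivial, by trivial⟩
      · simp [hmlen]
      · intro r hr
        rcases List.mem_or_eq_of_mem_set hr with h' | h'
        · exact hrows r h'
        · rw [h']; simp [hrowlen]
      · rw [hdist, len_ofList_append_singleton, if_neg hnotedge]
        push_cast; ring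
      · intro i j hi hj d
        by_cases hieq : i = x.toNat
        · by_cases hjeq : j = y.toNat
          · subst hieq; subst hjeq
            have hgi : ((m.set x.toNat (row.set y.toNat (cell ++ [dd]))).getD x.toNat [])
                = row.set y.toNat (cell ++ [dd]) := by
              rw [List.getD_eq_getElem?_getD, List.getElem?_set_self (by omega)]; rfl
            have hgj : ((row.set y.toNat (cell ++ [dd])).getD y.toNat []) = cell ++ [dd] := by
              rw [List.getD_eq_getElem?_getD, List.getElem?_set_self (by omega)]; rfl
            rw [hgi, hgj, hxt, hyt]
            constructor
            · intro h'
              rcases List.mem_append.1 h' with h' | h'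
              · refine List.mem_append_left _ ?_
                have := (hmem x.toNat y.toNat hxlt hylt d).1 h'
                rwa [hxt, hyt] at this
              · simp only [List.mem_singleton] at h'
                rw [h']
                exact List.mem_append_right _ (by simp)
            · intro h'
              rcases List.mem_append.1 h' with h' | h'
              · have := (hmem x.toNat y.toNat hxlt hylt d).2 (by rw [hxt, hyt]; exact h')
                exact List.mem_append_left _ this
              · simp only [List.mem_singleton, Prod.mk.injEq, true_and] at h'
                obtain ⟨hd1, hd2⟩ := h'
                have hdeq : d = dd := Prod.ext (by omega) (by omega)
                rw [hdeq]
                exact List.mem_append_right _ (by simp)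
          · -- same row, different column: the cell is untouched
            subst hieq
            have hgi : ((m.set x.toNat (row.set y.toNat (cell ++ [dd]))).getD x.toNat [])
                = row.set y.toNat (cell ++ [dd]) := by
              rw [List.getD_eq_getElem?_getD, List.getElem?_set_self (by omega)]; rfl
            have hgj : ((row.set y.toNat (cell ++ [dd])).getD j []) = row.getD j [] := by
              rw [List.getD_eq_getElem?_getD, List.getElem?_set_ne (fun h' => hjeq h'.symm),
                ← List.getD_eq_getElem?_getD]
            rw [hgi, hgj, hrowdef, hmem x.toNat j hi hj d, hxt]
            constructor
            · exact fun h' => List.mem_append_left _ h'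
            · intro h'
              rcases List.mem_append.1 h' with h' | h'
              · exact h'
              · simp only [List.mem_singleton, Prod.mk.injEq, true_and] at h'
                exact absurd h'.1 (fun hq => hjeq (by omega))
        · -- different row: untouched
          have hgi : ((m.set x.toNat (row.set y.toNat (cell ++ [dd]))).getD i [])
              = m.getD i [] := by
            rw [List.getD_eq_getElem?_getD, List.getElem?_set_ne (fun h' => hieq h'.symm),
              ← List.getD_eq_getElem?_getD]
          rw [hgi, hmem i j hi hj d]
          constructor
          · exact fun h' => List.mem_append_left _ h'
          · intro h'
            rcases List.mem_append.1 h' with h' | h'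
            · exact h'
            · simp only [List.mem_singleton, Prod.mk.injEq] at h'
              exact absurd h'.1 (fun hq => hieq (by omega))

lemma inv_foldl (cs : List Char) (m : List (List (List (Int × Int)))) (x y dist : Int)
    (edges : List (Int × Int × Int × Int)) (h : InvAB m x y dist edges) :
    (cs.foldl stepA (m, x, y, dist)).2.2.2
      = ((PySem.Set.ofList (cs.foldl stepE (edges, x, y)).1).length : Int) := by
  induction cs generalizing m x y dist edges with
  | nil => exact h.2.2.2.2.2.2.1
  | cons c cs ih =>
    obtain ⟨hinv, hx, hy⟩ := inv_step m x y dist edges c h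
    simp only [List.foldl_cons]
    have hA : stepA (m, x, y, dist) c
        = ((stepA (m, x, y, dist) c).1, (stepE (edges, x, y) c).2.1,
           (stepE (edges, x, y) c).2.2, (stepA (m, x, y, dist) c).2.2.2) := by
      rw [← hx, ← hy]
    have hB : stepE (edges, x, y) c
        = ((stepE (edges, x, y) c).1, (stepE (edges, x, y) c).2.1,
           (stepE (edges, x, y) c).2.2) := rfl
    rw [hA, hB]
    exact ih _ _ _ _ _ hinv

lemma inv_init : InvAB (List.replicate 11 (List.replicate 11 [])) 5 5 0 [] := by
  refine ⟨by norm_num, by norm_num, by norm_num, by norm_num, by simp, ?_, by simp [PySem.Set.ofList], ?_⟩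
  · intro r hr
    rw [List.eq_of_mem_replicate hr]
    simp
  · intro i j hi hj d
    have h1' : (List.replicate 11 (List.replicate 11 ([] : List (Int × Int)))).getD i []
        = List.replicate 11 [] := by
      rw [List.getD_eq_getElem?_getD, List.getElem?_replicate, if_pos hi, Option.getD_some]
    have h2' : (List.replicate 11 ([] : List (Int × Int))).getD j [] = [] := by
      rw [List.getD_eq_getElem?_getD, List.getElem?_replicate, if_pos hj, Option.getD_some]
    rw [h1', h2']
    simp

-- bounds of all recorded edges
def InB (e : Int × Int × Int × Int) : Prop :=
  0 ≤ e.1 ∧ e.1 ≤ 10 ∧ 0 ≤ e.2.1 ∧ e.2.1 ≤ 10 ∧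
  0 ≤ e.2.2.1 ∧ e.2.2.1 ≤ 10 ∧ 0 ≤ e.2.2.2 ∧ e.2.2.2 ≤ 10

lemma edges_inb (cs : List Char) (edges : List (Int × Int × Int × Int)) (x y : Int)
    (h0 : ∀ e ∈ edges, InB e) (hx0 : 0 ≤ x) (hx1 : x ≤ 10) (hy0 : 0 ≤ y) (hy1 : y ≤ 10) :
    ∀ e ∈ (cs.foldl stepE (edges, x, y)).1, InB e := by
  induction cs generalizing edges x y with
  | nil => exact h0
  | cons c cs ih =>
    simp only [List.foldl_cons, stepE]
    by_cases hb : x + (dirGetA c).1 < 0 ∨ y + (dirGetA c).2 < 0 ∨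
        x + (dirGetA c).1 > 10 ∨ y + (dirGetA c).2 > 10
    · simp only [if_pos hb]
      exact ih edges x y h0 hx0 hx1 hy0 hy1
    · simp only [if_neg hb]
      rw [not_or, not_or, not_or] at hb
      refine ih _ _ _ ?_ (by omega) (by omega) (by omega) (by omega)
      intro e he
      rcases List.mem_append.1 he with he | he
      · exact h0 e he
      · simp only [List.mem_singleton] at he
        rw [he]
        unfold InB
        dsimp only
        omega

-- pass 2 of B: the accumulating loop is keysOf
lemma keys_foldl_eq (path : List (Int × Int)) :
    (path.zip path.tail).foldl
      (fun ks pq => if pq.1 ≠ pq.2 then ks ++ [encKey pq.1 pq.2] else ks) []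
      = keysOf path := by
  have hfun : (fun (ks : List Int) (pq : (Int × Int) × (Int × Int)) =>
      if pq.1 ≠ pq.2 then ks ++ [encKey pq.1 pq.2] else ks)
      = fun ks pq => ks ++ (if pq.1 ≠ pq.2 then [encKey pq.1 pq.2] else []) := by
    funext ks pq
    split_ifs <;> simp
  rw [hfun, PySem.List.foldl_append_eq_flatMap]
  rfl

lemma zip_append_last (p : List (Int × Int)) (q d : Int × Int) (h : p ≠ []) :
    (p ++ [q]).zip (p ++ [q]).tail = p.zip p.tail ++ [(p.getLastD d, q)] := by
  induction p with
  | nil => exact absurd rfl h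
  | cons a t ih =>
    cases t with
    | nil => simp
    | cons b t' =>
      have := ih (by simp)
      simp only [List.cons_append, List.zip_cons_cons, List.tail_cons] at this ⊢
      rw [this]
      simp [List.getLastD]

lemma keysOf_concat (p : List (Int × Int)) (q : Int × Int) (h : p ≠ []) :
    keysOf (p ++ [q]) = keysOf p ++
      (if p.getLastD (0, 0) ≠ q then [encKey (p.getLastD (0, 0)) q] else []) := by
  unfold keysOf
  rw [zip_append_last p q (0, 0) h, List.flatMap_append]
  simp only [List.flatMap_cons, List.flatMap_nil, List.append_nil]

lemma getLastD_concat' (p : List (Int × Int)) (q d : Int × Int) :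
    (p ++ [q]).getLastD d = q := by
  induction p with
  | nil => rfl
  | cons a t ih => simp [List.getLastD]

-- main correspondence: B's trajectory yields exactly the encoded edge list of stepE
lemma walk_keys (cs : List Char) (hpre : ∀ c ∈ cs, dirGetB c ≠ (0, 0)) :
    ∀ (path : List (Int × Int)) (edges : List (Int × Int × Int × Int)) (x y : Int),
    path ≠ [] → path.getLastD (0, 0) = (x, y) → keysOf path = edges.map encE →
    keysOf (cs.foldl stepPath path) = ((cs.foldl stepE (edges, x, y)).1).map encE := by
  induction cs with
  | nil => intro path edges x y _ _ hk; exact hk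
  | cons c cs ih =>
    intro path edges x y hne hlast hk
    have hpre' : ∀ c' ∈ cs, dirGetB c' ≠ (0, 0) := fun c' hc' => hpre c' (List.mem_cons_of_mem _ hc')
    have hddB : dirGetB c ≠ (0, 0) := hpre c List.mem_cons_self
    have hBA : dirGetB c = dirGetA c := rfl
    simp only [List.foldl_cons, stepPath, stepE, hlast, hBA]
    set dd := dirGetA c with hdd
    have hddne : dd ≠ (0, 0) := hBA ▸ hddB
    by_cases hb : x + dd.1 < 0 ∨ y + dd.2 < 0 ∨ x + dd.1 > 10 ∨ y + dd.2 > 10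
    · have hcond : ¬ (0 ≤ x + dd.1 ∧ x + dd.1 ≤ 10 ∧ 0 ≤ y + dd.2 ∧ y + dd.2 ≤ 10) := by omega
      simp only [if_pos hb, if_neg hcond]
      refine ih hpre' (path ++ [(x, y)]) edges x y (by simp) (getLastD_concat' _ _ _) ?_
      rw [keysOf_concat path (x, y) hne, hlast]
      simp [hk]
    · have hcond : 0 ≤ x + dd.1 ∧ x + dd.1 ≤ 10 ∧ 0 ≤ y + dd.2 ∧ y + dd.2 ≤ 10 := by omega
      simp only [if_neg hb, if_pos hcond]
      refine ih hpre' (path ++ [(x + dd.1, y + dd.2)]) (edges ++ [(x, y, x + dd.1, y + dd.2)])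
        (x + dd.1) (y + dd.2) (by simp) (getLastD_concat' _ _ _) ?_
      have hxy : (x, y) ≠ (x + dd.1, y + dd.2) := by
        intro hq
        apply hddne
        have h1 := congrArg Prod.fst hq
        have h2 := congrArg Prod.snd hq
        simp only at h1 h2
        exact Prod.ext (by omega) (by omega)
      rw [keysOf_concat path (x + dd.1, y + dd.2) hne, hlast, if_pos hxy, hk]
      simp [encE, encKey]

-- |set(l)| = |l.toFinset|
lemma set_len_eq_card {α : Type} [DecidableEq α] [BEq α] [LawfulBEq α] (l : List α) :
    (PySem.Set.ofList l).length = l.toFinset.card := by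
  have hnd : (PySem.Set.ofList l).Nodup := PySem.Set.nodup_ofList l
  have hfs : (PySem.Set.ofList l).toFinset = l.toFinset := by
    ext a
    simp only [List.mem_toFinset]
    exact PySem.Set.mem_ofList l a
  rw [← List.toFinset_card_of_nodup hnd, hfs]

-- the key encoding is injective on in-bounds edges
lemma encE_inj (e f : Int × Int × Int × Int) (he : InB e) (hf : InB f)
    (h : encE e = encE f) : e = f := by
  obtain ⟨e1, e2, e3, e4⟩ := e
  obtain ⟨f1, f2, f3, f4⟩ := f
  simp only [encE, encKey, InB] at h he hf
  obtain ⟨a1, a2, a3, a4, a5, a6, a7, a8⟩ := he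
  obtain ⟨b1, b2, b3, b4, b5, b6, b7, b8⟩ := hf
  have h1 : e1 = f1 ∧ e2 = f2 ∧ e3 = f3 ∧ e4 = f4 := by omega
  simp [h1.1, h1.2.1, h1.2.2.1, h1.2.2.2]

-- count-distinct pass on a sorted list, general invariant
lemma cnt_some (l : List Int) (hp : l.Pairwise (· ≤ ·)) (p c : Int)
    (hall : ∀ a ∈ l, p ≤ a) :
    (l.foldl (fun st k => if some k ≠ st.2 then (st.1 + 1, some k) else (st.1, some k))
      (c, some p)).1 = c + ((l.toFinset.erase p).card : Int) := by
  induction l generalizing p c with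
  | nil => simp
  | cons a t ih =>
    rw [List.pairwise_cons] at hp
    obtain ⟨ha, ht⟩ := hp
    have hpa : p ≤ a := hall a List.mem_cons_self
    have hallt : ∀ b ∈ t, a ≤ b := ha
    simp only [List.foldl_cons, List.toFinset_cons]
    by_cases hap : a = p
    · subst hap
      have : ¬ (some a ≠ some a) := by simp
      rw [if_neg this]
      rw [ih ht a c hallt]
      congr 2
      rw [Finset.erase_insert_eq_erase]
    · have : (some a ≠ some p) := by simp [hap]
      rw [if_pos this]
      rw [ih ht a (c + 1) hallt]
      have hpnotin : p ∉ insert a t.toFinset := by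
        simp only [Finset.mem_insert, List.mem_toFinset]
        rintro (h | h)
        · exact hap h.symm
        · have := hallt p h
          omega
      rw [Finset.erase_eq_of_notMem hpnotin]
      by_cases hat : a ∈ t.toFinset
      · rw [Finset.insert_eq_self.2 hat]
        have := Finset.card_erase_add_one hat
        omega
      · rw [Finset.card_insert_of_notMem hat, Finset.erase_eq_of_notMem hat]
        push_cast
        omega

lemma cnt_none (l : List Int) (hp : l.Pairwise (· ≤ ·)) :
    (l.foldl (fun st k => if some k ≠ st.2 then (st.1 + 1, some k) else (st.1, some k))
      ((0 : Int), (none : Option Int))).1 = (l.toFinset.card : Int) := by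
  cases l with
  | nil => simp
  | cons a t =>
    rw [List.pairwise_cons] at hp
    obtain ⟨ha, ht⟩ := hp
    simp only [List.foldl_cons]
    rw [if_pos (by simp)]
    rw [cnt_some t ht a (0 + 1) ha]
    simp only [List.toFinset_cons]
    by_cases hat : a ∈ t.toFinset
    · rw [Finset.insert_eq_self.2 hat]
      have := Finset.card_erase_add_one hat
      push_cast
      omega
    · rw [Finset.card_insert_of_notMem hat, Finset.erase_eq_of_notMem hat]
      push_cast
      omega

-- ===== VERDICT (by name: the statement is the Claim_ definition above) =====
theorem solution_spec : Claim_equal_solution := by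
  intro dirs _ hpre
  unfold Spec_solution solution solution_alt
  simp only []
  -- A's side: distance = |set of edge tuples|
  have hA := inv_foldl dirs.toList _ 5 5 0 [] inv_init
  rw [hA]
  set E := (dirs.toList.foldl stepE ([], 5, 5)) with hE
  -- B's side: keys = edges encoded
  have hpreB : ∀ c ∈ dirs.toList, dirGetB c ≠ (0, 0) := by
    unfold Pre_solution at hpre
    rw [List.all_eq_true] at hpre
    intro c hc
    have := hpre c hc
    simp only [decide_eq_true_eq] at this
    rcases this with h | h | h | h <;> subst h <;> simp [dirGetB]
  have hkeys : keysOf (dirs.toList.foldl stepPath [(5, 5)]) = E.1.map encE :=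
    walk_keys dirs.toList hpreB [(5, 5)] [] 5 5 (by simp) rfl (by simp [keysOf])
  rw [keys_foldl_eq, hkeys]
  -- bounds → encoding injective on the edges
  have hinb : ∀ e ∈ E.1, InB e :=
    edges_inb dirs.toList [] 5 5 (by simp) (by norm_num) (by norm_num) (by norm_num) (by norm_num)
  -- sorted keys: pairwise ≤ and same finset
  set keys := E.1.map encE with hkeysdef
  set skeys := PySem.List.sorted keys (fun k => k) false with hskeys
  have hsp : skeys.Pairwise (· ≤ ·) := by
    have := PySem.List.sorted_pairwise (key := fun (k : Int) => k) (xs := keys)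
    simpa using this
  rw [cnt_none skeys hsp]
  have hperm : skeys.Perm keys := PySem.List.sorted_perm keys (fun k => k) false
  rw [List.toFinset_eq_of_perm _ _ hperm]
  -- |set(edges)| = |edges.toFinset| = |keys.toFinset|
  rw [set_len_eq_card]
  congr 1
  have hmapfs : (E.1.map encE).toFinset = E.1.toFinset.image encE := by
    ext a
    simp [Finset.mem_image]
  rw [hkeysdef, hmapfs]
  refine (Finset.card_image_of_injOn ?_).symm
  intro e he f hf hef
  rw [Finset.mem_coe, List.mem_toFinset] at he hf
  exact encE_inj e f (hinb e he) (hinb f hf) hef
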